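-- pv_equiv track=rewrite | github.com/ish-codes-magic/IPO-Readiness-PDF-Analyzer | backend/app/chat_service.py | _extract_summary_from_response
-- ===== SOURCE A (Python) =====
-- def _extract_summary_from_response(response: str) -> str:
--     """Extract summary paragraph from AI response"""
--     # Look for summary section
--     lines = response.split('\n')
--     summary_lines = []
--     in_summary = False
--
--     for line in lines:
--         if 'summary' in line.lower() and ':' in line:
--             in_summary = True
--             # Check if summary is on the same line
--             if line.split(':')[1].strip():
--                 summary_lines.append(line.split(':')[1].strip())
--             continue
--
--         if in_summary:
--             if line.strip() and not line.strip().startswith(('Key', 'Important', 'Main')):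
--                 summary_lines.append(line.strip())
--             elif line.strip().startswith(('Key', 'Important', 'Main')):
--                 break
--
--     summary = ' '.join(summary_lines).strip()
--     return summary if summary else "Conversation summary unavailable"
-- ===== SOURCE B (Python) =====
-- def _extract_summary_from_response(response: str) -> str:
--     """Extract summary paragraph from AI response.
--
--     Declarative pipeline: compute the header positions, slice out the body
--     window up to the first stop line, then map every window line uniformly
--     to its fragment (text after the colon for header-style lines, the
--     stripped line otherwise) and join the non-empty fragments.
--     """
--     lines = response.split('\n')
--
--     def is_header(l):
--         return 'summary' in l.lower() and ':' in l
--
--     def is_stop(l):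
--         return not is_header(l) and l.strip().startswith(('Key', 'Important', 'Main'))
--
--     def fragment(l):
--         return (l.split(':')[1] if is_header(l) else l).strip()
--
--     headers = [i for i, l in enumerate(lines) if is_header(l)]
--     if not headers:
--         return "Conversation summary unavailable"
--     tail = lines[headers[0] + 1:]
--     stops = [i for i, l in enumerate(tail) if is_stop(l)]
--     window = [lines[headers[0]]] + tail[:stops[0] if stops else len(tail)]
--     summary = ' '.join(f for f in map(fragment, window) if f).strip()
--     return summary or "Conversation summary unavailable"
-- ===== Notes on version B (the rewrite author's own statement) =====
-- stated objective: alternative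
-- what changed: Replaces A's single stateful loop (in_summary flag + break) by a declarative pipeline: comprehensions compute the header positions and the stop positions, the body window is a slice up to the first stop, and one uniform fragment map (post-colon text for header-style lines, stripped text otherwise) followed by a non-empty filter produces the joined summary.
import Mathlib
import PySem

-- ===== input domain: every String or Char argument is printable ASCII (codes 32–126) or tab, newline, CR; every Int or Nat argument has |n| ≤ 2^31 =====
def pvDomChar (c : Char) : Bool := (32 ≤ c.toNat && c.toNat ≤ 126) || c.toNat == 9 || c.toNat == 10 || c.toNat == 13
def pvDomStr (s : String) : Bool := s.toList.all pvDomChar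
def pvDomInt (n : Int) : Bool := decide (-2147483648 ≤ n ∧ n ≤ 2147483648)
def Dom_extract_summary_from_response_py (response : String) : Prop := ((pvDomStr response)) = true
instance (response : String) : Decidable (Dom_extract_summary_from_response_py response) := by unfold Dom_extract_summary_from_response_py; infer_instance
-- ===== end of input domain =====

-- B replaces A's single stateful loop (in_summary flag + break) by a declarative pipeline:
-- header positions, a body window sliced up to the first stop line, and a uniform
-- fragment map over the window; same cost.

-- shared micro-helpers (both Pythons evaluate these exact expressions)
-- 'summary' in line.lower() and ':' in line
def pvIsHeader (line : String) : Bool :=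
  PySem.Str.isIn "summary" (PySem.Str.lower line) && PySem.Str.isIn ":" line

-- line.split(':')[1].strip(); only evaluated under pvIsHeader, where ':' ∈ line guarantees index 1 exists (getD unreachable)
def pvAfterColon (line : String) : String :=
  PySem.Str.strip ((PySem.List.pyGet? ((PySem.Str.split? line ":").getD []) 1).getD "")

-- s.startswith(('Key', 'Important', 'Main'))
def pvStartsKIM (s : String) : Bool :=
  PySem.Str.startswith s "Key" || PySem.Str.startswith s "Important" || PySem.Str.startswith s "Main"

-- ===== PORT A =====
-- A's for-loop with the in_summary flag and break, as structural recursion over the lines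
def pvLoopA : List String → List String → Bool → List String
  | [], acc, _ => acc
  | line :: rest, acc, inSummary =>
    if pvIsHeader line then
      pvLoopA rest (if pvAfterColon line ≠ "" then acc ++ [pvAfterColon line] else acc) true
    else if inSummary then
      let s := PySem.Str.strip line
      if s ≠ "" && !pvStartsKIM s then pvLoopA rest (acc ++ [s]) inSummary
      else if pvStartsKIM s then acc  -- break
      else pvLoopA rest acc inSummary
    else pvLoopA rest acc inSummary

def extract_summary_from_response_py (response : String) : String :=
  let lines := (PySem.Str.split? response "\n").getD []
  let summary := PySem.Str.strip (PySem.Str.join " " (pvLoopA lines [] false))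
  if summary ≠ "" then summary else "Conversation summary unavailable"

-- ===== PORT B =====
-- is_stop(l) = not is_header(l) and l.strip().startswith(('Key','Important','Main'))
def pvIsStop (l : String) : Bool := !pvIsHeader l && pvStartsKIM (PySem.Str.strip l)

-- fragment(l) = (l.split(':')[1] if is_header(l) else l).strip()   (strip distributed into the two branches)
def pvFragment (l : String) : String :=
  if pvIsHeader l then pvAfterColon l else PySem.Str.strip l

def extract_summary_from_response_py_alt (response : String) : String :=
  let lines := (PySem.Str.split? response "\n").getD []
  let headers := (PySem.List.enumerate lines).filterMap
    (fun p => if pvIsHeader p.2 then some p.1 else none)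
  match headers with
  | [] => "Conversation summary unavailable"
  | h0 :: _ =>
    let tail := PySem.List.slice lines (some (h0 + 1)) none
    let stops := (PySem.List.enumerate tail).filterMap
      (fun p => if pvIsStop p.2 then some p.1 else none)
    let cut : Int := match stops with | [] => (tail.length : Int) | s0 :: _ => s0
    let window := [(PySem.List.pyGet? lines h0).getD ""] ++ PySem.List.slice tail none (some cut)
    let summary := PySem.Str.strip
      (PySem.Str.join " " ((window.map pvFragment).filter (fun f => f ≠ "")))
    if summary ≠ "" then summary else "Conversation summary unavailable"

-- ===== PRECONDITION & SPEC =====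
def Spec_extract_summary_from_response_py (response : String) (out : String) : Prop := out = extract_summary_from_response_py_alt response
instance (response : String) (out : String) : Decidable (Spec_extract_summary_from_response_py response out) := by unfold Spec_extract_summary_from_response_py; infer_instance

-- ===== CLAIM (what is proved, stated in full; the proofs are below) =====
def Claim_equal_extract_summary_from_response_py : Prop := ∀ (response : String), Dom_extract_summary_from_response_py response → Spec_extract_summary_from_response_py response (extract_summary_from_response_py response)

-- ===== LEMMAS AND PROOFS =====

-- A-side canonical form: first header line together with the lines after it
def pvFindHeader : List String → Option (String × List String)
  | [] => none
  | l :: rest => if pvIsHeader l then some (l, rest) else pvFindHeader rest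

-- A's in-summary loop phase equals the filtered fragment map of the window
theorem pvLoopA_true (lines : List String) : ∀ acc, pvLoopA lines acc true =
    acc ++ ((lines.takeWhile (fun x => !pvIsStop x)).map pvFragment).filter (fun f => f ≠ "") := by
  induction lines with
  | nil => intro acc; simp [pvLoopA]
  | cons line rest ih =>
    intro acc
    simp only [pvLoopA]
    by_cases hH : pvIsHeader line = true
    · have hs : pvIsStop line = false := by simp [pvIsStop, hH]
      have hf : pvFragment line = pvAfterColon line := by simp [pvFragment, hH]
      simp only [hH, if_true, List.takeWhile_cons, hs, Bool.not_false, ih, hf, List.map_cons,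
        List.filter_cons]
      by_cases hc : pvAfterColon line = "" <;> simp [hc]
    · have hf : pvFragment line = PySem.Str.strip line := by simp [pvFragment, hH]
      by_cases hK : pvStartsKIM (PySem.Str.strip line) = true
      · have hs : pvIsStop line = true := by simp [pvIsStop, hH, hK]
        simp [hH, hK, hs]
      · have hs : pvIsStop line = false := by simp [pvIsStop, hH, hK]
        by_cases he : PySem.Str.strip line = ""
        · have hK0 : pvStartsKIM "" = false := by decide
          simp [hH, he, hs, ih, hf, hK0]
        · simp [hH, hK, he, hs, ih, hf]

-- before the header, A's loop just searches
theorem pvLoopA_false (lines : List String) : ∀ acc, pvLoopA lines acc false =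
    match pvFindHeader lines with
    | none => acc
    | some (hl, rest) =>
        pvLoopA rest (acc ++ (if pvAfterColon hl ≠ "" then [pvAfterColon hl] else [])) true := by
  induction lines with
  | nil => intro acc; rfl
  | cons line rest ih =>
    intro acc
    simp only [pvLoopA, pvFindHeader]
    by_cases hH : pvIsHeader line = true
    · by_cases hc : pvAfterColon line = "" <;> simp [hH, hc]
    · simp [hH, ih]

-- pvFindHeader = none means every line fails the header test
theorem pvFindHeader_none (lines : List String) (h : pvFindHeader lines = none) :
    ∀ l ∈ lines, pvIsHeader l = false := by
  induction lines with
  | nil => simp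
  | cons line rest ih =>
    simp only [pvFindHeader] at h
    by_cases hH : pvIsHeader line = true
    · simp [hH] at h
    · simp only [hH] at h
      intro l hl
      rcases List.mem_cons.mp hl with rfl | hl
      · simpa using hH
      · exact ih h l hl

-- pvFindHeader = some splits the list at the first header
theorem pvFindHeader_some (lines : List String) (hl : String) (rest : List String)
    (h : pvFindHeader lines = some (hl, rest)) :
    ∃ pre, lines = pre ++ hl :: rest ∧ (∀ l ∈ pre, pvIsHeader l = false) ∧ pvIsHeader hl = true := by
  induction lines generalizing hl rest with
  | nil => simp [pvFindHeader] at h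
  | cons line t ih =>
    simp only [pvFindHeader] at h
    by_cases hH : pvIsHeader line = true
    · simp only [hH, if_true, Option.some.injEq, Prod.mk.injEq] at h
      exact ⟨[], by simp [h.1, h.2], by simp, h.1 ▸ hH⟩
    · rw [if_neg hH] at h
      obtain ⟨pre, heq, hpre, hhdr⟩ := ih _ _ h
      exact ⟨line :: pre, by simp [heq], by
        intro l hmem
        rcases List.mem_cons.mp hmem with rfl | hmem
        · simpa using hH
        · exact hpre l hmem, hhdr⟩

-- no header line ⇒ B's headers comprehension is empty
theorem pvHeaders_nil (lines : List String) (h : ∀ l ∈ lines, pvIsHeader l = false) :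
    ∀ s, (PySem.List.enumerate lines s).filterMap
      (fun p => if pvIsHeader p.2 then some p.1 else none) = [] := by
  induction lines with
  | nil => intro s; simp [PySem.List.enumerate_nil]
  | cons line rest ih =>
    intro s
    have h0 : pvIsHeader line = false := h line (by simp)
    simp [PySem.List.enumerate_cons, h0,
      ih (fun l hl => h l (List.mem_cons_of_mem _ hl))]


-- every index produced by the stops comprehension is ≥ the enumeration start
theorem pvStops_ge (t : List String) (s : Int) :
    ∀ k ∈ (PySem.List.enumerate t s).filterMap
      (fun p => if pvIsStop p.2 then some p.1 else none), s ≤ k := by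
  intro k hk
  obtain ⟨p, hp, hif⟩ := List.mem_filterMap.mp hk
  obtain ⟨j, hj, rfl⟩ := (PySem.List.mem_enumerate_iff t s p).mp hp
  split at hif <;> simp_all
  omega

-- slicing the tail up to the first stop index is takeWhile (not stop)
theorem pvCut_slice (t : List String) : ∀ s : Int,
    PySem.List.slice t none (some ((match (PySem.List.enumerate t s).filterMap
        (fun p => if pvIsStop p.2 then some p.1 else none) with
      | [] => s + (t.length : Int) | k :: _ => k) - s))
      = t.takeWhile (fun x => !pvIsStop x) := by
  induction t with
  | nil => intro s; simp [PySem.List.enumerate_nil, PySem.List.slice_to]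
  | cons x t ih =>
    intro s
    simp only [PySem.List.enumerate_cons, List.filterMap_cons]
    by_cases hx : pvIsStop x = true
    · have h0 : ((s : Int) - s) = ((0 : Nat) : Int) := by omega
      simp only [hx, if_true, h0, PySem.List.slice_to_natCast]
      simp [hx]
    · simp only [hx, if_false, Bool.false_eq_true]
      have ih' := ih (s + 1)
      cases hM : (PySem.List.enumerate t (s + 1)).filterMap
          (fun p => if pvIsStop p.2 then some p.1 else none) with
      | nil =>
        simp only [hM, List.length_cons, Nat.cast_add, Nat.cast_one] at ih' ⊢
        have e1 : s + ((t.length : Int) + 1) - s = ((t.length + 1 : Nat) : Int) := by push_cast; omega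
        have e2 : s + 1 + (t.length : Int) - (s + 1) = ((t.length : Nat) : Int) := by omega
        rw [e1, PySem.List.slice_to_natCast]
        rw [e2, PySem.List.slice_to_natCast] at ih'
        simp only [List.take_succ_cons, List.takeWhile_cons, hx, Bool.not_false, if_true, ih']
      | cons k M =>
        have hks : s + 1 ≤ k := pvStops_ge t (s + 1) k (by rw [hM]; exact List.mem_cons_self)
        simp only [hM] at ih' ⊢
        have e1 : k - s = (((k - s).toNat : Nat) : Int) := by omega
        have e2 : k - (s + 1) = (((k - s).toNat - 1 : Nat) : Int) := by omega
        rw [e1, PySem.List.slice_to_natCast]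
        rw [e2, PySem.List.slice_to_natCast] at ih'
        have e3 : (k - s).toNat = ((k - s).toNat - 1) + 1 := by omega
        rw [e3, List.take_succ_cons]
        simp [hx, ih']

-- B's headers comprehension on a list split at its first header
theorem pvHeaders_cons (pre rest : List String) (hl : String)
    (hpre : ∀ l ∈ pre, pvIsHeader l = false) (hhl : pvIsHeader hl = true) :
    (PySem.List.enumerate (pre ++ hl :: rest) 0).filterMap
        (fun p => if pvIsHeader p.2 then some p.1 else none)
      = (pre.length : Int) :: (PySem.List.enumerate rest ((pre.length : Int) + 1)).filterMap
        (fun p => if pvIsHeader p.2 then some p.1 else none) := by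
  rw [PySem.List.enumerate_append, List.filterMap_append, pvHeaders_nil pre hpre 0,
    PySem.List.enumerate_cons, List.filterMap_cons]
  simp [hhl]

-- ===== VERDICT (by name: the statement is the Claim_ definition above) =====
theorem extract_summary_from_response_py_spec : Claim_equal_extract_summary_from_response_py := by
  intro response _
  unfold Spec_extract_summary_from_response_py
  simp only [extract_summary_from_response_py, extract_summary_from_response_py_alt,
    pvLoopA_false]
  cases h : pvFindHeader ((PySem.Str.split? response "\n").getD []) with
  | none =>
    rw [pvHeaders_nil _ (pvFindHeader_none _ h) 0]
    have : PySem.Str.strip (PySem.Str.join " " []) = "" := by decide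
    simp [this]
  | some p =>
    obtain ⟨hl, rest⟩ := p
    obtain ⟨pre, heq, hpre, hhl⟩ := pvFindHeader_some _ _ _ h
    rw [heq, pvHeaders_cons pre rest hl hpre hhl]
    have htail : PySem.List.slice (pre ++ hl :: rest) (some ((pre.length : Int) + 1)) none
        = rest := by
      have e : ((pre.length : Int) + 1) = ((pre.length + 1 : Nat) : Int) := by push_cast; ring
      have e2 : pre ++ hl :: rest = (pre ++ [hl]) ++ rest := by simp
      rw [e, PySem.List.slice_from_natCast, e2]
      simp
    have hget : (PySem.List.pyGet? (pre ++ hl :: rest) ((pre.length : Int))).getD "" = hl := by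
      rw [PySem.List.pyGet?_natCast]
      simp
    have hcut := pvCut_slice rest 0
    simp only [zero_add, sub_zero] at hcut
    simp only [htail, hcut, hget, pvLoopA_true, List.singleton_append, List.map_cons,
      List.filter_cons]
    have hf : pvFragment hl = pvAfterColon hl := by simp [pvFragment, hhl]
    by_cases hc : pvAfterColon hl = "" <;> simp [hf, hc]
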